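-- pv_equiv track=rewrite | github.com/huggingface/diffusers | scripts/convert_original_ldm3d_to_diffusers.py | replace_digits0
-- ===== SOURCE A (Python) =====
-- def replace_digits0(string):
--     digits = "0123456789"
--     result = ""
--     digit_count = 0
--
--     for char in string:
--         if char in digits:
--             if digit_count == 0:
--                 new_digit = abs(int(char) - 3)
--             # elif digit_count == 1:
--             # new_digit = abs(int(char) - 2)
--             else:
--                 new_digit = int(char)
--
--             result += str(new_digit)
--             digit_count += 1
--         else:
--             result += char
--
--     return result
-- ===== SOURCE B (Python) =====
-- def replace_digits0(string):
--     for i, char in enumerate(string):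
--         if char in "0123456789":
--             return string[:i] + str(abs(int(char) - 3)) + string[i + 1:]
--     return string
-- ===== Notes on version B (the rewrite author's own statement) =====
-- stated objective: simpler
-- what changed: B replaces A's full char-by-char copy with a maintained result string and digit_count flag by an early-return scan: find the index of the first digit and splice the transformed digit between two slices, returning the string (or a slice-splice of it) without per-character concatenation.
import Mathlib
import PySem

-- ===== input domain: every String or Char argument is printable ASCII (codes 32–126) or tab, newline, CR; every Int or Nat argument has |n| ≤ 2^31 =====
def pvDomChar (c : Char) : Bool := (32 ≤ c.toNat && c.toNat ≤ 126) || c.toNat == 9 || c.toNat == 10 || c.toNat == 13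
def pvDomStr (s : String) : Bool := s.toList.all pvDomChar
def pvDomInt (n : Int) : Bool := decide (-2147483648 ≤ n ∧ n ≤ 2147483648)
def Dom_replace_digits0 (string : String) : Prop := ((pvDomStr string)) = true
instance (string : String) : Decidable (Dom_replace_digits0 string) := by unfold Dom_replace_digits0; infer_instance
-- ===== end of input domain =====

-- B replaces A's maintained result/digit_count accumulation by an early-return
-- scan for the first digit plus a slice-splice; equal return value on all inputs.

-- ===== PORT A =====
-- loop body of A: state = (result as chars, digit_count)
def pvStepA (st : List Char × Int) (char : Char) : List Char × Int :=
  if ("0123456789".toList.contains char) then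
    let new_digit : Int :=
      if st.2 = 0 then |(PySem.Int.ofChars? [char]).getD 0 - 3|
      else (PySem.Int.ofChars? [char]).getD 0
    (st.1 ++ (PySem.Int.toStr new_digit).toList, st.2 + 1)
  else
    (st.1 ++ [char], st.2)

def replace_digits0 (string : String) : String :=
  String.ofList (string.toList.foldl pvStepA ([], 0)).1

-- ===== PORT B =====
def replace_digits0_alt (string : String) : String :=
  match (PySem.List.enumerate string.toList 0).find?
      (fun p => "0123456789".toList.contains p.2) with
  | some (i, char) =>
      String.ofList (PySem.List.slice string.toList none (some i)
        ++ (PySem.Int.toStr |(PySem.Int.ofChars? [char]).getD 0 - 3|).toList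
        ++ PySem.List.slice string.toList (some (i + 1)) none)
  | none => string

-- ===== PRECONDITION & SPEC =====
def Spec_replace_digits0 (string : String) (out : String) : Prop := out = replace_digits0_alt string
instance (string : String) (out : String) : Decidable (Spec_replace_digits0 string out) := by unfold Spec_replace_digits0; infer_instance

-- ===== CLAIM (what is proved, stated in full; the proofs are below) =====
def Claim_equal_replace_digits0 : Prop := ∀ (string : String), Dom_replace_digits0 string → Spec_replace_digits0 string (replace_digits0 string)

-- ===== LEMMAS AND PROOFS =====

-- a digit char round-trips through int/str unchanged
theorem pv_digit_roundtrip (c : Char) (h : "0123456789".toList.contains c = true) :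
    (PySem.Int.toStr ((PySem.Int.ofChars? [c]).getD 0)).toList = [c] := by
  have h' : c ∈ ['0','1','2','3','4','5','6','7','8','9'] := by simpa using h
  fin_cases h' <;> decide

-- the accumulator only prefixes the first component; the counter ignores it
theorem pv_foldl_acc (l : List Char) : ∀ (acc : List Char) (dc : Int),
    l.foldl pvStepA (acc, dc) =
      (acc ++ (l.foldl pvStepA ([], dc)).1, (l.foldl pvStepA ([], dc)).2) := by
  induction l with
  | nil => intro acc dc; simp
  | cons c rest ih =>
    intro acc dc
    simp only [List.foldl_cons, pvStepA, List.nil_append]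
    by_cases hc : "0123456789".toList.contains c = true
    · simp only [hc, if_true]
      rw [ih, ih ((PySem.Int.toStr _).toList)]
      simp [List.append_assoc]
    · simp only [hc, Bool.false_eq_true, if_false]
      rw [ih, ih [c]]
      simp

-- once digit_count is positive every character (digit or not) is copied verbatim
theorem pv_foldl_copy (l : List Char) : ∀ (acc : List Char) (dc : Int), 0 < dc →
    (l.foldl pvStepA (acc, dc)).1 = acc ++ l := by
  induction l with
  | nil => intro acc dc _; simp
  | cons c rest ih =>
    intro acc dc hdc
    simp only [List.foldl_cons]
    by_cases hc : "0123456789".toList.contains c = true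
    · simp only [pvStepA, hc, if_true]
      have hne : ¬ dc = 0 := by omega
      simp only [hne, if_false]
      rw [ih _ (dc + 1) (by omega), pv_digit_roundtrip c hc]
      simp
    · simp only [pvStepA, hc, Bool.false_eq_true, if_false]
      rw [ih _ dc hdc]; simp

-- find? over enumerate started at s+1 is the shift of find? started at s
theorem pv_find_shift (p : Char → Bool) (l : List Char) : ∀ (s : Int),
    (PySem.List.enumerate l (s + 1)).find? (fun q => p q.2) =
      Option.map (fun q => (q.1 + 1, q.2))
        ((PySem.List.enumerate l s).find? (fun q => p q.2)) := by
  induction l with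
  | nil => intro s; simp [PySem.List.enumerate_nil]
  | cons c rest ih =>
    intro s
    rw [PySem.List.enumerate_cons, PySem.List.enumerate_cons]
    by_cases hc : p c = true
    · simp [hc]
    · simp only [List.find?_cons, hc]
      exact ih (s + 1)

-- main induction, stated over the character list
theorem pv_main (l : List Char) :
    (l.foldl pvStepA ([], 0)).1 =
      (match (PySem.List.enumerate l 0).find?
          (fun p => "0123456789".toList.contains p.2) with
       | some (i, char) =>
           PySem.List.slice l none (some i)
             ++ (PySem.Int.toStr |(PySem.Int.ofChars? [char]).getD 0 - 3|).toList
             ++ PySem.List.slice l (some (i + 1)) none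
       | none => l) := by
  induction l with
  | nil => simp [PySem.List.enumerate_nil]
  | cons c rest ih =>
    rw [PySem.List.enumerate_cons, List.find?_cons]
    by_cases hc : "0123456789".toList.contains c = true
    · -- head is the first digit: A transforms it then copies; B splices at index 0
      simp only [hc, if_true, List.foldl_cons, pvStepA, List.nil_append]
      have hz : ((0 : Int) + 1) = 1 := by ring
      rw [hz, pv_foldl_copy rest _ 1 (by omega)]
      have h0 : PySem.List.slice (c :: rest) none (some (0 : Int)) = ([] : List Char) := by
        rw [show ((0 : Int)) = ((0 : Nat) : Int) from rfl, PySem.List.slice_to_natCast]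
        simp
      have h1 : PySem.List.slice (c :: rest) (some (1 : Int)) none = rest := by
        rw [show ((1 : Int)) = ((1 : Nat) : Int) from rfl, PySem.List.slice_from_natCast]
        simp
      simp [h0, h1]
    · -- head is not a digit: both sides copy it and recurse
      simp only [hc, Bool.false_eq_true, if_false, List.foldl_cons, pvStepA, List.nil_append]
      rw [pv_foldl_acc rest [c] 0, pv_find_shift _ rest 0]
      cases hfind : (PySem.List.enumerate rest 0).find?
          (fun q => "0123456789".toList.contains q.2) with
      | none =>
        rw [hfind] at ih
        simpa using congrArg (fun t => c :: t) ih
      | some q =>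
        obtain ⟨i, char⟩ := q
        rw [hfind] at ih
        have hmem := List.mem_of_find?_eq_some hfind
        rw [PySem.List.mem_enumerate_iff] at hmem
        obtain ⟨k, hk, hpq⟩ := hmem
        have hik : i = (k : Int) := by
          have := congrArg Prod.fst hpq; simpa using this
        subst hik
        simp only [Option.map_some]
        have hsA : PySem.List.slice rest none (some (k : Int)) = rest.take k :=
          PySem.List.slice_to_natCast rest k
        have hsB : PySem.List.slice rest (some ((k : Int) + 1)) none = rest.drop (k + 1) := by
          rw [show ((k : Int) + 1) = (((k + 1 : Nat)) : Int) by push_cast; ring,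
            PySem.List.slice_from_natCast]
        have hsA' : PySem.List.slice (c :: rest) none (some ((k : Int) + 1)) = c :: rest.take k := by
          rw [show ((k : Int) + 1) = (((k + 1 : Nat)) : Int) by push_cast; ring,
            PySem.List.slice_to_natCast]
          simp
        have hsB' : PySem.List.slice (c :: rest) (some ((k : Int) + 1 + 1)) none
            = rest.drop (k + 1) := by
          rw [show ((k : Int) + 1 + 1) = (((k + 2 : Nat)) : Int) by push_cast; ring,
            PySem.List.slice_from_natCast]
          simp
        simp only [hsA, hsB] at ih
        simp only [hsA', hsB']
        rw [ih]
        simp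

-- ===== VERDICT (by name: the statement is the Claim_ definition above) =====
theorem replace_digits0_spec : Claim_equal_replace_digits0 := by
  intro s _
  unfold Spec_replace_digits0 replace_digits0 replace_digits0_alt
  rw [pv_main s.toList]
  cases hfind : (PySem.List.enumerate s.toList 0).find?
      (fun p => "0123456789".toList.contains p.2) with
  | none => simp
  | some q => obtain ⟨i, char⟩ := q; simp
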